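-- pv_equiv track=rewrite | github.com/pypi-data/pypi-mirror-396 | packages/ai2070-l0/ai2070_l0-0.19.0.tar.gz/ai2070_l0-0.19.0/src/l0/_utils.py | _find_first_json_delimiter
-- ===== SOURCE A (Python) =====
-- def _find_first_json_delimiter(text: str) -> tuple[int, str, str] | None:
--     """Find the first JSON delimiter ({ or [) that is NOT inside a quoted string.
--
--     Args:
--         text: Text to search
--
--     Returns:
--         Tuple of (start_index, open_char, close_char) or None if not found
--     """
--     in_string = False
--     escape_next = False
--
--     for i, char in enumerate(text):
--         if escape_next:
--             escape_next = False
--             continue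
--
--         if char == "\\":
--             escape_next = True
--             continue
--
--         if char == '"':
--             in_string = not in_string
--             continue
--
--         # Only consider delimiters outside of strings
--         if not in_string:
--             if char == "{":
--                 return (i, "{", "}")
--             if char == "[":
--                 return (i, "[", "]")
--
--     return None
-- ===== SOURCE B (Python) =====
-- def _find_first_json_delimiter(text: str) -> tuple[int, str, str] | None:
--     n = len(text)
--     i = 0
--     while i < n:
--         c = text[i]
--         if c == "\\":
--             i += 2
--         elif c == '"':
--             i += 1
--             closed = False
--             while i < n:
--                 if text[i] == "\\":
--                     i += 2
--                 elif text[i] == '"':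
--                     i += 1
--                     closed = True
--                     break
--                 else:
--                     i += 1
--             if not closed:
--                 return None
--         elif c == "{":
--             return (i, "{", "}")
--         elif c == "[":
--             return (i, "[", "]")
--         else:
--             i += 1
--     return None
-- ===== Notes on version B (the rewrite author's own statement) =====
-- stated objective: alternative
-- what changed: Replaced A's single pass with in_string/escape_next boolean flags by an index-based outer scan that, on a double quote, enters a dedicated inner loop consuming the whole quoted-string body (advancing by 2 on backslashes); the flag state disappears entirely.
import Mathlib
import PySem

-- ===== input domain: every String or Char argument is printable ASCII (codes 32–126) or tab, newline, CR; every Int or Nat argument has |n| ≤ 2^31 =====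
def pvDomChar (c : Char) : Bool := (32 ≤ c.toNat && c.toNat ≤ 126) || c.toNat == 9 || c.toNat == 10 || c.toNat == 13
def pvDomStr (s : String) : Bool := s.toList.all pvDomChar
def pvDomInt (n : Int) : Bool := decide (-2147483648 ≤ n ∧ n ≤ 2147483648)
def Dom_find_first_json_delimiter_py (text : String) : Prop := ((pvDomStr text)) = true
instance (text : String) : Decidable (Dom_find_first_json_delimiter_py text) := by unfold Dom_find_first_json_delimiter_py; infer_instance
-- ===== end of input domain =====

-- B replaces A's in_string/escape_next flag machine by an outer scan with an inner
-- string-skipping loop (different decomposition, same cost); equivalence of return values.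

-- ===== PORT A =====
-- A's flag machine: scan with in_string / escape_next flags, index carried as Int
def goA : List Char → Int → Bool → Bool → Option (Int × String × String)
  | [], _, _, _ => none
  | c :: rest, i, instr, esc =>
    if esc then goA rest (i+1) instr false
    else if c = '\\' then goA rest (i+1) instr true
    else if c = '"' then goA rest (i+1) (!instr) esc
    else if !instr then
      if c = '{' then some (i, "{", "}")
      else if c = '[' then some (i, "[", "]")
      else goA rest (i+1) instr esc
    else goA rest (i+1) instr esc

def find_first_json_delimiter_py (text : String) : Option (Int × String × String) :=
  goA text.toList 0 false false

-- ===== PORT B =====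
-- B's inner loop: consume a quoted-string body; some (suffix after the closing
-- quote, its index) or none if the string never closes
def skipStr : List Char → Int → Option (List Char × Int)
  | [], _ => none
  | c :: rest, j =>
    if c = '\\' then
      match rest with
      | [] => none
      | _ :: r => skipStr r (j+2)
    else if c = '"' then some (rest, j+1)
    else skipStr rest (j+1)

-- termination helper for goB: skipStr returns a strictly shorter suffix
theorem skipStr_len_aux : ∀ (n : Nat) (l : List Char), l.length ≤ n →
    ∀ (j : Int) (r : List Char) (k : Int), skipStr l j = some (r, k) → r.length < l.length := by
  intro n
  induction n with
  | zero =>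
    intro l hl j r k h
    match l with
    | [] => simp [skipStr] at h
    | c :: rest => simp at hl
  | succ n ih =>
    intro l hl j r k h
    match l with
    | [] => simp [skipStr] at h
    | c :: rest =>
      rw [skipStr.eq_def] at h
      simp only at h
      split at h
      · match rest with
        | [] => simp at h
        | c2 :: r' =>
          simp only at h
          have := ih r' (by simp at hl ⊢; omega) (j+2) r k h
          simp; omega
      · split at h
        · simp at h; simp [h.1]
        · have := ih rest (by simp at hl ⊢; omega) (j+1) r k h
          simp; omega

-- B's outer loop: advance by 2 on backslash, skip string bodies with skipStr
def goB : List Char → Int → Option (Int × String × String)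
  | [], _ => none
  | c :: rest, i =>
    if c = '\\' then
      match rest with
      | [] => none
      | _ :: r => goB r (i+2)
    else if c = '"' then
      match h : skipStr rest (i+1) with
      | none => none
      | some (r, k) => goB r k
    else if c = '{' then some (i, "{", "}")
    else if c = '[' then some (i, "[", "]")
    else goB rest (i+1)
termination_by l _ => l.length
decreasing_by
  all_goals first
    | (have := skipStr_len_aux rest.length rest le_rfl (i+1) r k h; simp; omega)
    | (simp; omega)
    | simp

def find_first_json_delimiter_py_alt (text : String) : Option (Int × String × String) :=
  goB text.toList 0

-- ===== PRECONDITION & SPEC =====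
def Spec_find_first_json_delimiter_py (text : String) (out : Option (Int × String × String)) : Prop := out = find_first_json_delimiter_py_alt text
instance (text : String) (out : Option (Int × String × String)) : Decidable (Spec_find_first_json_delimiter_py text out) := by unfold Spec_find_first_json_delimiter_py; infer_instance

-- ===== CLAIM (what is proved, stated in full; the proofs are below) =====
def Claim_equal_find_first_json_delimiter_py : Prop := ∀ (text : String), Dom_find_first_json_delimiter_py text → Spec_find_first_json_delimiter_py text (find_first_json_delimiter_py text)

-- ===== LEMMAS AND PROOFS =====

-- in-string behaviour of A's flag machine = "skip the string body, then resume"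
theorem goA_instr_aux : ∀ (n : Nat) (l : List Char), l.length ≤ n → ∀ (j : Int),
    goA l j true false =
      (match skipStr l j with
       | none => none
       | some (r, k) => goA r k false false) := by
  intro n
  induction n with
  | zero =>
    intro l hl j
    match l with
    | [] => simp [goA, skipStr]
    | c :: rest => simp at hl
  | succ n ih =>
    intro l hl j
    rw [skipStr.eq_def]
    match l with
    | [] => simp [goA]
    | c :: rest =>
      by_cases hb : c = '\\'
      · match rest with
        | [] => simp [goA, hb]
        | c2 :: r' =>
          simp only [goA, hb, Bool.false_eq_true, if_true, reduceIte]
          rw [show (j:Int)+1+1 = j+2 from by ring]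
          exact ih r' (by simp at hl ⊢; omega) (j+2)
      · by_cases hq : c = '"'
        · simp [goA, hb, hq]
        · simp only [goA, hb, hq, Bool.not_true, Bool.false_eq_true, reduceIte]
          exact ih rest (by simp at hl ⊢; omega) (j+1)

theorem goA_eq_goB_aux : ∀ (n : Nat) (l : List Char), l.length ≤ n → ∀ (i : Int),
    goA l i false false = goB l i := by
  intro n
  induction n with
  | zero =>
    intro l hl i
    match l with
    | [] => simp [goA, goB]
    | c :: rest => simp at hl
  | succ n ih =>
    intro l hl i
    match l with
    | [] => simp [goA, goB]
    | c :: rest =>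
      rw [goB.eq_def]
      by_cases hb : c = '\\'
      · match rest with
        | [] => simp [goA, hb]
        | c2 :: r' =>
          simp only [goA, hb, Bool.false_eq_true, reduceIte]
          rw [show (i:Int)+1+1 = i+2 from by ring]
          exact ih r' (by simp at hl ⊢; omega) (i+2)
      · by_cases hq : c = '"'
        · simp only [goA, hb, hq, Bool.false_eq_true, reduceIte, Bool.not_false]
          rw [goA_instr_aux rest.length rest le_rfl (i+1)]
          cases hs : skipStr rest (i+1) with
          | none => simp [hs]
          | some rk =>
            obtain ⟨r, k⟩ := rk
            have hr : r.length < rest.length :=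
              skipStr_len_aux rest.length rest le_rfl (i+1) r k hs
            simp only [hs]
            have : goA r k false false = goB r k := ih r (by simp at hl ⊢; omega) k
            simp [this]
        · by_cases hcu : c = '{'
          · simp [goA, hb, hq, hcu]
          · by_cases hsq : c = '['
            · simp [goA, hb, hq, hcu, hsq]
            · simp only [goA, hb, hq, hcu, hsq, Bool.false_eq_true, reduceIte,
                Bool.not_false]
              exact ih rest (by simp at hl ⊢; omega) (i+1)

-- ===== VERDICT (by name: the statement is the Claim_ definition above) =====
theorem find_first_json_delimiter_py_spec : Claim_equal_find_first_json_delimiter_py := by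
  intro text _
  unfold Spec_find_first_json_delimiter_py find_first_json_delimiter_py find_first_json_delimiter_py_alt
  exact goA_eq_goB_aux text.toList.length text.toList le_rfl 0
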